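-- pv_equiv track=rewrite | github.com/alan-he-494165/DML_G8 | data_util/process_news/calculate_semantic_score/process_raw_news_sentiment.py | match_symbols
-- ===== SOURCE A (Python) =====
-- def match_symbols(text: str, name_to_symbol: dict[str, str], sorted_names: list[str]) -> list[str]:
--     matched = []
--     seen = set()
--     for name in sorted_names:
--         if name in text:
--             symbol = name_to_symbol[name]
--             if symbol not in seen:
--                 matched.append(symbol)
--                 seen.add(symbol)
--     return matched
-- ===== SOURCE B (Python) =====
-- def match_symbols(text: str, name_to_symbol: dict[str, str], sorted_names: list[str]) -> list[str]:
--     lengths = {len(name) for name in sorted_names}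
--     subs = {text[i:i + L] for L in lengths for i in range(len(text) - L + 1)}
--     out = []
--     for name in sorted_names:
--         if name in subs:
--             symbol = name_to_symbol[name]
--             if symbol not in out:
--                 out.append(symbol)
--     return out
-- ===== Notes on version B (the rewrite author's own statement) =====
-- stated objective: faster
-- what changed: Instead of scanning the text once per name ('name in text'), B builds an index from the text: the hash set of all substrings of text at the lengths occurring among the names, then answers each name by one set-membership test; dedup is by membership in the output list instead of a seen set.
import Mathlib
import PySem

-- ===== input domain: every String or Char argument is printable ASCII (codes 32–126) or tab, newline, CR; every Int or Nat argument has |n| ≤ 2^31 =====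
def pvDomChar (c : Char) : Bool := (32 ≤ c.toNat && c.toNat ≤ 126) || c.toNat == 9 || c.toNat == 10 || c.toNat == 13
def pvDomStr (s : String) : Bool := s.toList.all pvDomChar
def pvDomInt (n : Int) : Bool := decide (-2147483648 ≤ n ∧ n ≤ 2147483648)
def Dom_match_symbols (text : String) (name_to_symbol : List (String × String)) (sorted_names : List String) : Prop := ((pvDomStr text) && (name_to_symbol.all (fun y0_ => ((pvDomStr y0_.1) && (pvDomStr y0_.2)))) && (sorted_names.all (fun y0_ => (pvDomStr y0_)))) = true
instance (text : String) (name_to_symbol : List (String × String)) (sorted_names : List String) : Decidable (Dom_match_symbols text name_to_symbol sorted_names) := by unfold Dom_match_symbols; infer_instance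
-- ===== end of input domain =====

-- B replaces A's per-name substring scan by an index built from the text: the set of
-- all substrings of text at the lengths occurring among the names, then one membership
-- test per name; dedup is by membership in the output list itself.

-- ===== PORT A =====
-- A: one loop over sorted_names, appending fresh symbols and recording them in a seen set.
def match_symbols (text : String) (name_to_symbol : List (String × String)) (sorted_names : List String) : List String :=
  let d := PySem.Dict.ofList name_to_symbol
  let st := sorted_names.foldl
    (fun (acc : List String × PySem.Set String) name =>
      if PySem.Str.isIn name text then
        -- name_to_symbol[name]; Pre_ guarantees the key is present (KeyError excluded)
        let symbol := (d.get? name).getD ""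
        if PySem.Set.contains acc.2 symbol then acc
        else (acc.1 ++ [symbol], PySem.Set.add acc.2 symbol)
      else acc)
    ([], PySem.Set.empty)
  st.1

-- ===== PORT B =====
-- B: lengths = {len(name) …}; subs = {text[i:i+L] for L in lengths for i in range(len(text)-L+1)};
-- then one loop over sorted_names testing membership in subs, dedup via the output list.
-- (text[i:i+L] is ported on text.toList; the String-vs-List Char membership test is exact.)
def match_symbols_alt (text : String) (name_to_symbol : List (String × String)) (sorted_names : List String) : List String :=
  let tl := text.toList
  let lengths : PySem.Set Int := PySem.Set.ofList (sorted_names.map (fun name => (PySem.Str.len name : Int)))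
  let subs : PySem.Set (List Char) :=
    lengths.foldl
      (fun s L =>
        (PySem.List.pyRange 0 ((tl.length : Int) - L + 1) 1).foldl
          (fun s i => PySem.Set.add s (PySem.List.slice tl (some i) (some (i + L)))) s)
      PySem.Set.empty
  sorted_names.foldl
    (fun (out : List String) name =>
      if PySem.Set.contains subs name.toList then
        let symbol := ((PySem.Dict.ofList name_to_symbol).get? name).getD ""
        if out.contains symbol then out else out ++ [symbol]
      else out)
    []

-- ===== PRECONDITION & SPEC =====
-- Pre_ excludes exactly the inputs where A (and B alike) raises KeyError:
-- a name that occurs in text but is not a key of name_to_symbol.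
def Pre_match_symbols (text : String) (name_to_symbol : List (String × String)) (sorted_names : List String) : Prop :=
  ∀ name ∈ sorted_names, PySem.Str.isIn name text = true →
    (PySem.Dict.ofList name_to_symbol).contains name = true
instance (text : String) (name_to_symbol : List (String × String)) (sorted_names : List String) : Decidable (Pre_match_symbols text name_to_symbol sorted_names) := by unfold Pre_match_symbols; infer_instance

def pvWitness_match_symbols : String × (List (String × String)) × List String :=
  ("acme corp rises", [("acme corp", "ACME"), ("beta", "BET")], ["acme corp", "beta"])

def Spec_match_symbols (text : String) (name_to_symbol : List (String × String)) (sorted_names : List String) (out : List String) : Prop := out = match_symbols_alt text name_to_symbol sorted_names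
instance (text : String) (name_to_symbol : List (String × String)) (sorted_names : List String) (out : List String) : Decidable (Spec_match_symbols text name_to_symbol sorted_names out) := by unfold Spec_match_symbols; infer_instance

-- ===== CLAIM (what is proved, stated in full; the proofs are below) =====
def Claim_equal_match_symbols : Prop := ∀ (text : String) (name_to_symbol : List (String × String)) (sorted_names : List String), Dom_match_symbols text name_to_symbol sorted_names → Pre_match_symbols text name_to_symbol sorted_names → Spec_match_symbols text name_to_symbol sorted_names (match_symbols text name_to_symbol sorted_names)

-- ===== LEMMAS AND PROOFS =====

-- membership in B's doubly-folded substring set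
theorem pv_mem_subs (tl : List Char) (Ls : List Int) (s0 : PySem.Set (List Char)) (y : List Char) :
    y ∈ Ls.foldl
      (fun s L =>
        (PySem.List.pyRange 0 ((tl.length : Int) - L + 1) 1).foldl
          (fun s i => PySem.Set.add s (PySem.List.slice tl (some i) (some (i + L)))) s) s0
    ↔ y ∈ s0 ∨ ∃ L ∈ Ls, ∃ i : Int, (0 ≤ i ∧ i < (tl.length : Int) - L + 1) ∧
        y = PySem.List.slice tl (some i) (some (i + L)) := by
  induction Ls generalizing s0 with
  | nil => simp
  | cons L Ls ih =>
      simp only [List.foldl_cons, ih, PySem.Set.mem_foldl_add, PySem.List.mem_pyRange_one]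
      constructor
      · rintro (⟨h | ⟨i, hi, hy⟩⟩ | ⟨L', hL', i, hi, hy⟩)
        · exact Or.inl h
        · exact Or.inr ⟨L, by simp, i, hi, hy⟩
        · exact Or.inr ⟨L', by simp [hL'], i, hi, hy⟩
      · rintro (h | ⟨L', hL', i, hi, hy⟩)
        · exact Or.inl (Or.inl h)
        · rcases List.mem_cons.mp hL' with rfl | hL'
          · exact Or.inl (Or.inr ⟨i, hi, hy⟩)
          · exact Or.inr ⟨L', hL', i, hi, hy⟩

-- the guard of B equals the guard of A for every name whose length occurs among the lengths
theorem pv_guard (text : String) (sorted_names : List String) (name : String)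
    (hmem : name ∈ sorted_names) :
    PySem.Set.contains
      ((PySem.Set.ofList (sorted_names.map (fun n => (PySem.Str.len n : Int)))).foldl
        (fun s L =>
          (PySem.List.pyRange 0 ((text.toList.length : Int) - L + 1) 1).foldl
            (fun s i => PySem.Set.add s (PySem.List.slice text.toList (some i) (some (i + L)))) s)
        ([] : PySem.Set (List Char))) name.toList
    = PySem.Str.isIn name text := by
  set tl := text.toList with htl
  by_cases hin : PySem.Str.isIn name text = true
  case neg =>
    -- name not in text: name.toList is not in subs
    rw [Bool.eq_false_iff.mpr hin, Bool.eq_false_iff]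
    intro hc
    have hmem' := (PySem.Set.contains_iff _ _).mp hc
    rw [pv_mem_subs] at hmem'
    rcases hmem' with h | ⟨L, hL, i, ⟨hi0, hiub⟩, hy⟩
    · simp at h
    · -- L is a length, so 0 ≤ L; the slice is a prefix of a drop, hence infix
      have hL0 : 0 ≤ L := by
        rcases List.mem_map.mp ((PySem.Set.mem_ofList _ _).mp hL) with ⟨n, _, rfl⟩
        have : PySem.Str.len n = (n.toList.length : Int) := by simp [PySem.Str.len_eq]
        omega
      have : name.toList <+: tl.drop i.toNat := by
        rw [hy]
        rw [PySem.List.slice_toNat tl hi0 (by omega)]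
        exact List.take_prefix _ _
      exact hin (by
        rw [PySem.Str.isIn_iff_infix, ← htl]
        exact this.isInfix.trans (List.drop_suffix _ _).isInfix)
  case pos =>
    -- name in text: exhibit the slice at the first occurrence
    rw [hin, PySem.Set.contains_iff, pv_mem_subs]
    have hinf : name.toList <:+: tl := by
      rw [← PySem.Str.isIn_iff_infix, hin]
    obtain ⟨j, hpre⟩ : ∃ j, name.toList <+: tl.drop j :=
      (PySem.Chars.exists_prefix_drop_iff_isIn name.toList tl).mpr
        (by rw [PySem.Chars.isIn_iff_infix]; exact hinf)
    -- normalise j to j ≤ tl.length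
    have hj' : name.toList <+: tl.drop (min j tl.length) := by
      by_cases h : j ≤ tl.length
      · simpa [min_eq_left h] using hpre
      · have h0 : tl.drop j = [] := List.drop_eq_nil_of_le (by omega)
        rw [h0] at hpre
        have : name.toList = [] := List.prefix_nil.mp hpre
        simp [this]
    set k := min j tl.length with hk
    have hk_le : k ≤ tl.length := min_le_right _ _
    have hlen_le : name.toList.length ≤ tl.length - k := by
      have := hj'.length_le
      simpa [List.length_drop] using this
    have hlen : PySem.Str.len name = (name.toList.length : Int) := by
      simp [PySem.Str.len_eq]
    refine Or.inr ⟨PySem.Str.len name, ?_, (k : Int), ⟨by positivity, ?_⟩, ?_⟩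
    · exact (PySem.Set.mem_ofList _ _).mpr (List.mem_map.mpr ⟨name, hmem, rfl⟩)
    · omega
    · rw [hlen, PySem.List.slice_natCast_add]
      exact List.prefix_iff_eq_take.mp hj'

-- A's paired state keeps seen = matched at every step; collapsing it, A's loop is B's
-- output loop with A's guard.
theorem pv_foldl_pair (p : String → Bool) (f : String → String)
    (xs : List String) (m : List String) :
    (xs.foldl
      (fun (acc : List String × PySem.Set String) name =>
        if p name then
          if PySem.Set.contains acc.2 (f name) then acc
          else (acc.1 ++ [f name], PySem.Set.add acc.2 (f name))
        else acc)
      (m, m)).1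
    = xs.foldl
      (fun (out : List String) name =>
        if p name then
          if out.contains (f name) then out else out ++ [f name]
        else out) m := by
  induction xs generalizing m with
  | nil => rfl
  | cons x xs ih =>
      simp only [List.foldl_cons]
      by_cases hp : p x = true
      · by_cases hc : PySem.Set.contains m (f x) = true
        · have hc' : (m : List String).contains (f x) = true := by
            simpa using hc
          simp only [hp, if_true, hc, if_true, hc']
          exact ih m
        · have hc' : (m : List String).contains (f x) = false := by
            simpa using Bool.eq_false_iff.mpr hc
          have hadd : PySem.Set.add m (f x) = m ++ [f x] := by
            unfold PySem.Set.add; rw [if_neg hc]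
          simp only [hp, if_true, hc, if_false, hc', hadd, Bool.false_eq_true]
          exact ih (m ++ [f x])
      · simp only [hp, if_false, Bool.false_eq_true]
        exact ih m

-- ===== VERDICT (by name: the statement is the Claim_ definition above) =====
theorem match_symbols_spec : Claim_equal_match_symbols := by
  intro text name_to_symbol sorted_names _ _
  unfold Spec_match_symbols match_symbols match_symbols_alt
  dsimp only [PySem.Set.empty]
  rw [pv_foldl_pair (fun name => PySem.Str.isIn name text)
    (fun name => ((PySem.Dict.ofList name_to_symbol).get? name).getD "") sorted_names []]
  exact PySem.List.foldl_congr_mem' sorted_names _ _ []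
    (fun name hmem acc => by rw [← pv_guard text sorted_names name hmem])
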